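-- pv_equiv track=rewrite | github.com/iwajef/Codeforces-Solutions | Brute Force/894A QAQ.py | solve
-- ===== SOURCE A (Python) =====
-- def solve(s):
--     if len(s) < 3:
--         return 0
--     ans = 0
--     for i in range(len(s)):
--         for j in range(i + 1, len(s)):
--             for k in range(j + 1, len(s)):
--                 if s[i] == 'Q' and s[j] == 'A' and s[k] == 'Q':
--                     ans += 1
--     return ans
-- ===== SOURCE B (Python) =====
-- def solve(s):
--     q = qa = qaq = 0
--     for ch in s:
--         if ch == 'Q':
--             qaq += qa
--             q += 1
--         elif ch == 'A':
--             qa += q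
--     return qaq
-- ===== Notes on version B (the rewrite author's own statement) =====
-- stated objective: faster
-- what changed: Replaced the O(n^3) triple index loop over all (i,j,k) triples by a single left-to-right pass accumulating counts of 'Q' prefixes, 'QA' pairs and 'QAQ' subsequences.
import Mathlib
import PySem

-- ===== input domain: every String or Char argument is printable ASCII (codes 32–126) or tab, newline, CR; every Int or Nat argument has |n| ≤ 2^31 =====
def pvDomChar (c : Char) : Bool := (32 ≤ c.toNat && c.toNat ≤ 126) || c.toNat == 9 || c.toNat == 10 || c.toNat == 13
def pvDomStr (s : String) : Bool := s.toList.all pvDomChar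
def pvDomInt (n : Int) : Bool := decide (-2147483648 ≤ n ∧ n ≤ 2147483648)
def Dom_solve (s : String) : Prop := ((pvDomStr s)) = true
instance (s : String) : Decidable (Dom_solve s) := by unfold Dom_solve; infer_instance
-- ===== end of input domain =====

-- B replaces A's O(n^3) triple index loop by one left-to-right pass keeping counts of 'Q', 'QA' and 'QAQ' subsequences seen so far.

-- ===== PORT A =====
-- literal port of the triple nested loop over index ranges
def solve (s : String) : Int :=
  if PySem.Str.len s < 3 then 0
  else
    (PySem.List.pyRange 0 (PySem.Str.len s)).foldl (fun ans i =>
      (PySem.List.pyRange (i + 1) (PySem.Str.len s)).foldl (fun ans j =>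
        (PySem.List.pyRange (j + 1) (PySem.Str.len s)).foldl (fun ans k =>
          if ((PySem.Str.pyGet? s i == some 'Q') &&
              (PySem.Str.pyGet? s j == some 'A')) && (PySem.Str.pyGet? s k == some 'Q') then
            ans + 1
          else ans) ans) ans) 0

-- ===== PORT B =====
-- one step of B's single pass: state is (q, qa, qaq)
def solveAltStep (st : Int × Int × Int) (ch : Char) : Int × Int × Int :=
  if ch = 'Q' then (st.1 + 1, st.2.1, st.2.2 + st.2.1)
  else if ch = 'A' then (st.1, st.2.1 + st.1, st.2.2)
  else st

def solve_alt (s : String) : Int :=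
  (s.toList.foldl solveAltStep (0, 0, 0)).2.2

-- ===== PRECONDITION & SPEC =====
def Spec_solve (s : String) (out : Int) : Prop := out = solve_alt s
instance (s : String) (out : Int) : Decidable (Spec_solve s out) := by unfold Spec_solve; infer_instance

-- ===== CLAIM (what is proved, stated in full; the proofs are below) =====
def Claim_equal_solve : Prop := ∀ (s : String), Dom_solve s → Spec_solve s (solve s)

-- ===== LEMMAS AND PROOFS =====

-- structural subsequence counters used by the proof
def countQ : List Char → Int
  | [] => 0
  | c :: t => (if c = 'Q' then 1 else 0) + countQ t

def countA : List Char → Int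
  | [] => 0
  | c :: t => (if c = 'A' then 1 else 0) + countA t

def countAQ : List Char → Int
  | [] => 0
  | c :: t => (if c = 'A' then countQ t else 0) + countAQ t

def countQA : List Char → Int
  | [] => 0
  | c :: t => (if c = 'Q' then countA t else 0) + countQA t

def countQAQ : List Char → Int
  | [] => 0
  | c :: t => (if c = 'Q' then countAQ t else 0) + countQAQ t

-- innermost loop of A counts the 'Q's at indices ≥ a, gated by b
lemma loop1 (s : String) (m : Nat) : ∀ (a : Int) (b : Bool) (ans : Int), 0 ≤ a →
    s.toList.length - a.toNat = m →
    (PySem.List.pyRange a (s.toList.length : Int)).foldl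
      (fun ans k => if b && (PySem.Str.pyGet? s k == some 'Q') then ans + 1 else ans) ans
    = ans + (if b then countQ (s.toList.drop a.toNat) else 0) := by
  induction m with
  | zero =>
    intro a b ans h0 hm
    rw [PySem.List.pyRange_one_eq_nil (by omega)]
    rw [List.drop_eq_nil_of_le (by omega)]
    simp [countQ]
  | succ m ih =>
    intro a b ans h0 hm
    have hlt : a < (s.toList.length : Int) := by omega
    have hn : a.toNat < s.toList.length := by omega
    rw [PySem.List.pyRange_one_cons hlt, List.foldl_cons]
    rw [ih (a + 1) b _ (by omega) (by omega)]
    have hget : PySem.Str.pyGet? s a = s.toList[a.toNat]? := by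
      rw [show a = ((a.toNat : Nat) : Int) by omega]; exact PySem.Str.pyGet?_natCast s a.toNat
    have h1 : (a + 1).toNat = a.toNat + 1 := by omega
    have hd : s.toList.drop a.toNat = s.toList[a.toNat] :: s.toList.drop (a.toNat + 1) :=
      List.drop_eq_getElem_cons hn
    rw [hget, h1, hd]
    simp only [countQ, List.getElem?_eq_getElem hn]
    by_cases hb : b <;> by_cases hc : s.toList[a.toNat] = 'Q' <;> simp [hb, hc] <;> ring_nf

-- middle double loop of A counts 'A…Q' pairs at indices ≥ a, gated by b
lemma loop2 (s : String) (m : Nat) : ∀ (a : Int) (b : Bool) (ans : Int), 0 ≤ a →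
    s.toList.length - a.toNat = m →
    (PySem.List.pyRange a (s.toList.length : Int)).foldl
      (fun ans j =>
        (PySem.List.pyRange (j + 1) (s.toList.length : Int)).foldl
          (fun ans k =>
            if (b && (PySem.Str.pyGet? s j == some 'A')) && (PySem.Str.pyGet? s k == some 'Q') then
              ans + 1
            else ans) ans) ans
    = ans + (if b then countAQ (s.toList.drop a.toNat) else 0) := by
  induction m with
  | zero =>
    intro a b ans h0 hm
    rw [PySem.List.pyRange_one_eq_nil (by omega)]
    rw [List.drop_eq_nil_of_le (by omega)]
    simp [countAQ]
  | succ m ih =>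
    intro a b ans h0 hm
    have hlt : a < (s.toList.length : Int) := by omega
    have hn : a.toNat < s.toList.length := by omega
    rw [PySem.List.pyRange_one_cons hlt, List.foldl_cons]
    rw [loop1 s (s.toList.length - (a + 1).toNat) (a + 1)
          (b && (PySem.Str.pyGet? s a == some 'A')) ans (by omega) rfl]
    rw [ih (a + 1) b _ (by omega) (by omega)]
    have hget : PySem.Str.pyGet? s a = s.toList[a.toNat]? := by
      rw [show a = ((a.toNat : Nat) : Int) by omega]; exact PySem.Str.pyGet?_natCast s a.toNat
    have h1 : (a + 1).toNat = a.toNat + 1 := by omega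
    have hd : s.toList.drop a.toNat = s.toList[a.toNat] :: s.toList.drop (a.toNat + 1) :=
      List.drop_eq_getElem_cons hn
    rw [hget, h1, hd]
    simp only [countAQ, List.getElem?_eq_getElem hn]
    by_cases hb : b <;> by_cases hc : s.toList[a.toNat] = 'A' <;> simp [hb, hc] <;> ring_nf

-- outer triple loop of A counts 'Q…A…Q' subsequences at indices ≥ a
lemma loop3 (s : String) (m : Nat) : ∀ (a : Int) (ans : Int), 0 ≤ a →
    s.toList.length - a.toNat = m →
    (PySem.List.pyRange a (s.toList.length : Int)).foldl
      (fun ans i =>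
        (PySem.List.pyRange (i + 1) (s.toList.length : Int)).foldl
          (fun ans j =>
            (PySem.List.pyRange (j + 1) (s.toList.length : Int)).foldl
              (fun ans k =>
                if ((PySem.Str.pyGet? s i == some 'Q') &&
                    (PySem.Str.pyGet? s j == some 'A')) && (PySem.Str.pyGet? s k == some 'Q') then
                  ans + 1
                else ans) ans) ans) ans
    = ans + countQAQ (s.toList.drop a.toNat) := by
  induction m with
  | zero =>
    intro a ans h0 hm
    rw [PySem.List.pyRange_one_eq_nil (by omega)]
    rw [List.drop_eq_nil_of_le (by omega)]
    simp [countQAQ]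
  | succ m ih =>
    intro a ans h0 hm
    have hlt : a < (s.toList.length : Int) := by omega
    have hn : a.toNat < s.toList.length := by omega
    rw [PySem.List.pyRange_one_cons hlt, List.foldl_cons]
    rw [loop2 s (s.toList.length - (a + 1).toNat) (a + 1)
          (PySem.Str.pyGet? s a == some 'Q') ans (by omega) rfl]
    rw [ih (a + 1) _ (by omega) (by omega)]
    have hget : PySem.Str.pyGet? s a = s.toList[a.toNat]? := by
      rw [show a = ((a.toNat : Nat) : Int) by omega]; exact PySem.Str.pyGet?_natCast s a.toNat
    have h1 : (a + 1).toNat = a.toNat + 1 := by omega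
    have hd : s.toList.drop a.toNat = s.toList[a.toNat] :: s.toList.drop (a.toNat + 1) :=
      List.drop_eq_getElem_cons hn
    rw [hget, h1, hd]
    simp only [countQAQ, List.getElem?_eq_getElem hn]
    by_cases hc : s.toList[a.toNat] = 'Q' <;> simp [hc] <;> ring_nf

-- B's fold invariant: the running state over a suffix, from any initial state
lemma step_invariant (t : List Char) : ∀ (q qa qaq : Int),
    t.foldl solveAltStep (q, qa, qaq)
    = (q + countQ t, qa + countQA t + q * countA t,
       qaq + countQAQ t + qa * countQ t + q * countAQ t) := by
  induction t with
  | nil => intro q qa qaq; simp [countQ, countQA, countA, countQAQ, countAQ]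
  | cons c t ih =>
    intro q qa qaq
    rw [List.foldl_cons]
    by_cases hq : c = 'Q'
    · rw [show solveAltStep (q, qa, qaq) c = (q + 1, qa, qaq + qa) by simp [solveAltStep, hq]]
      rw [ih]
      simp only [countQ, countQA, countA, countQAQ, countAQ, hq, Char.reduceEq, if_true, if_false, Prod.mk.injEq]
      refine ⟨by ring, by ring, by ring⟩
    · by_cases hA : c = 'A'
      · rw [show solveAltStep (q, qa, qaq) c = (q, qa + q, qaq) by simp [solveAltStep, hA]]
        rw [ih]
        simp only [countQ, countQA, countA, countQAQ, countAQ, hA, Char.reduceEq, if_true, if_false, Prod.mk.injEq]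
        refine ⟨by ring, by ring, by ring⟩
      · rw [show solveAltStep (q, qa, qaq) c = (q, qa, qaq) by simp [solveAltStep, hq, hA]]
        rw [ih]
        simp only [countQ, countQA, countA, countQAQ, countAQ, if_neg hq, if_neg hA,
          Prod.mk.injEq]
        refine ⟨by ring, by ring, by ring⟩

lemma solve_alt_eq (s : String) : solve_alt s = countQAQ s.toList := by
  unfold solve_alt
  rw [step_invariant]
  ring

-- a string of fewer than 3 characters has no QAQ subsequence
lemma countQAQ_short (t : List Char) (h : t.length < 3) : countQAQ t = 0 := by
  match t, h with
  | [], _ => rfl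
  | [c], _ => simp [countQAQ, countAQ]
  | [c, d], _ =>
    simp only [countQAQ, countAQ, countQ]
    by_cases hc : c = 'Q' <;> by_cases hd : d = 'A' <;> by_cases hq : d = 'Q' <;>
      simp [hc, hd, hq]

-- ===== VERDICT (by name: the statement is the Claim_ definition above) =====
theorem solve_spec : Claim_equal_solve := by
  intro s _
  unfold Spec_solve solve
  rw [solve_alt_eq]
  rw [PySem.Str.len_eq]
  by_cases h : (s.toList.length : Int) < 3
  · rw [if_pos h, countQAQ_short s.toList (by omega)]
  · rw [if_neg h]
    rw [loop3 s s.toList.length 0 0 le_rfl (by omega)]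
    simp
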